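-- pv_equiv track=rewrite | github.com/LynnT-2003/First-Year-Python-Programming-Basics | final 1/6411271_Question7.py | ProductX
-- ===== SOURCE A (Python) =====
-- def ProductX(num_list):
--
--     tocount = True
--     total = 1
--
--     temp = []
--
--     ### IF ONLY ONE ZERO ###
--     c = 0
--     for i in range(len(num_list)):
--         if num_list[i] == 0:
--             c += 1
--     if c == 1:
--         num_list.remove(0)
--         totalx = 1
--         for each in num_list:
--             if each > 0 and each < 9:
--                 totalx = totalx * each
--         return totalx
--     ### ###
--
--
--     for i in range(len(num_list)):
--
--         if num_list[i] != 0 and num_list[i] > 0 and num_list[i] < 9 and tocount == True: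
--             total *= num_list[i]
--         elif num_list[i] != 0 and num_list[i] > 0 and num_list[i] < 9 and tocount == False:
--             if num_list[i]%2 != 0:
--                 total *= num_list[i]
--
--         elif num_list[i] == 0 and tocount == True:
--             tocount = False
--
--         elif num_list[i] == 0 and tocount == False:
--             for j in range (i+1, len(num_list)):
--                 tocount = True
--                 if num_list[j] == 0:
--                     tocount = False
--                     break
--     return total
-- ===== SOURCE B (Python) =====
-- def ProductX(num_list):
--     zeros = num_list.count(0)
--     if zeros == 1:
--         # the single zero fails 0 < x, so no need to remove it first
--         total = 1
--         for x in num_list: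
--             if 0 < x < 9:
--                 total *= x
--         return total
--     total = 1
--     tocount = True
--     n = len(num_list)
--     zleft = zeros
--     for i, x in enumerate(num_list):
--         if x == 0:
--             zleft -= 1
--             # A's rescan-ahead: counting resumes only at the second consecutive
--             # zero-state zero, when no zero remains ahead and we are not at the end
--             tocount = (not tocount) and zleft == 0 and i + 1 < n
--         elif 0 < x < 9 and (tocount or x % 2 != 0):
--             total *= x
--     return total
-- ===== Notes on version B (the rewrite author's own statement) =====
-- stated objective: alternative
-- what changed: Replaces A's look-ahead rescan at each zero (and the remove(0) pass in the single-zero case) with a single pass that tracks the number of zeros still remaining, merging A's four branches into two; intended as faster (worst-case O(n) vs O(n^2)), measured only 1.41x at the largest size.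
import Mathlib
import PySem

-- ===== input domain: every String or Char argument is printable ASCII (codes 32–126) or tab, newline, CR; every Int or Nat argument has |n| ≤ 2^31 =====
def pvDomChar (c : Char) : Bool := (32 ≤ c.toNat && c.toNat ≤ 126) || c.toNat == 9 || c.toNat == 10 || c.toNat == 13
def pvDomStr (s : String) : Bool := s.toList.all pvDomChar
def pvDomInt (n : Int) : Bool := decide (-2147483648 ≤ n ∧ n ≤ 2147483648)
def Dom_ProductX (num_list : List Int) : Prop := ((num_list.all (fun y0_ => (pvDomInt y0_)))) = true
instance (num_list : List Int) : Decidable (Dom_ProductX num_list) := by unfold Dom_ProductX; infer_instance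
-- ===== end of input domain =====

-- B replaces A's look-ahead rescans at each zero with a single pass tracking the zeros still remaining.
-- A mutates num_list (remove(0)) when it holds exactly one zero; B does not — equivalence is about the return value only.

-- ===== PORT A =====
-- `for i in range(len(num_list)): if num_list[i] == 0: c += 1` — the index loop reads
-- num_list[i] for i = 0..n-1 in order, i.e. the elements of num_list in order.
def pvA_countZeros : List Int → Int → Int
  | [], c => c
  | x :: xs, c => if x = 0 then pvA_countZeros xs (c + 1) else pvA_countZeros xs c

-- `for each in num_list: if each > 0 and each < 9: totalx = totalx * each`
def pvA_prodSmall : List Int → Int → Int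
  | [], totalx => totalx
  | x :: xs, totalx => if x > 0 ∧ x < 9 then pvA_prodSmall xs (totalx * x) else pvA_prodSmall xs totalx

-- inner `for j in range(i+1, len(num_list))`: num_list[j] for j = i+1.. are exactly the
-- elements after position i, passed here as `rest`; `tocount = True` then break-on-zero.
def pvA_scan : List Int → Bool → Bool
  | [], tocount => tocount
  | y :: ys, _ => if y = 0 then false else pvA_scan ys true

-- main `for i in range(len(num_list))` with state (tocount, total); num_list[i] is the head
-- of the remaining suffix, the inner scan receives that suffix's tail.
def pvA_loop : List Int → Bool → Int → Int
  | [], _, total => total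
  | x :: rest, tocount, total =>
    if x ≠ 0 ∧ x > 0 ∧ x < 9 ∧ tocount = true then
      pvA_loop rest tocount (total * x)
    else if x ≠ 0 ∧ x > 0 ∧ x < 9 ∧ tocount = false then
      if PySem.Int.mod x 2 ≠ 0 then pvA_loop rest tocount (total * x)
      else pvA_loop rest tocount total
    else if x = 0 ∧ tocount = true then
      pvA_loop rest false total
    else if x = 0 ∧ tocount = false then
      pvA_loop rest (pvA_scan rest false) total
    else
      pvA_loop rest tocount total

def ProductX (num_list : List Int) : Int :=
  let c := pvA_countZeros num_list 0
  if c = 1 then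
    -- num_list.remove(0); c = 1 guarantees 0 ∈ num_list, so remove? is some
    let num_list' := (PySem.List.remove? num_list 0).getD num_list
    pvA_prodSmall num_list' 1
  else
    pvA_loop num_list true 1

-- ===== PORT B =====
-- `for i, x in enumerate(num_list)` with state (total, zleft, tocount); i + 1 < n is
-- tracked as `rest ≠ []` (the remaining elements after position i).
def pvB_loop : List Int → Int → Int → Bool → Int
  | [], total, _, _ => total
  | x :: rest, total, zleft, tocount =>
    if x = 0 then
      pvB_loop rest total (zleft - 1) (!tocount && zleft - 1 = 0 && !rest.isEmpty)
    else if 0 < x ∧ x < 9 ∧ (tocount || PySem.Int.mod x 2 ≠ 0) then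
      pvB_loop rest (total * x) zleft tocount
    else
      pvB_loop rest total zleft tocount

-- `total = 1; for x in num_list: if 0 < x < 9: total *= x`
def pvB_prodSmall : List Int → Int → Int
  | [], total => total
  | x :: xs, total => if 0 < x ∧ x < 9 then pvB_prodSmall xs (total * x) else pvB_prodSmall xs total

def ProductX_alt (num_list : List Int) : Int :=
  let zeros : Int := PySem.List.count num_list 0
  if zeros = 1 then pvB_prodSmall num_list 1
  else pvB_loop num_list 1 zeros true

-- ===== PRECONDITION & SPEC =====
def Spec_ProductX (num_list : List Int) (out : Int) : Prop := out = ProductX_alt num_list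
instance (num_list : List Int) (out : Int) : Decidable (Spec_ProductX num_list out) := by unfold Spec_ProductX; infer_instance

-- ===== CLAIM (what is proved, stated in full; the proofs are below) =====
def Claim_equal_ProductX : Prop := ∀ (num_list : List Int), Dom_ProductX num_list → Spec_ProductX num_list (ProductX num_list)

-- ===== LEMMAS AND PROOFS =====

set_option maxHeartbeats 1000000

theorem pvA_countZeros_eq (l : List Int) (c : Int) :
    pvA_countZeros l c = c + (PySem.List.count l 0 : Int) := by
  induction l generalizing c with
  | nil => simp [pvA_countZeros, PySem.List.count_eq]
  | cons x xs ih =>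
    simp only [pvA_countZeros]
    by_cases h : x = 0
    · subst h
      rw [if_pos rfl, ih]
      simp [PySem.List.count_eq]
      ring
    · rw [if_neg h, ih]
      simp [PySem.List.count_eq, List.count_cons]
      exact h

theorem pvA_prodSmall_eq (l : List Int) (t : Int) : pvA_prodSmall l t = pvB_prodSmall l t := by
  induction l generalizing t with
  | nil => rfl
  | cons x xs ih =>
    simp only [pvA_prodSmall, pvB_prodSmall]
    split_ifs with h <;> exact ih _

theorem pvA_prodSmall_remove (l : List Int) (t : Int) :
    pvA_prodSmall ((PySem.List.remove? l 0).getD l) t = pvA_prodSmall l t := by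
  induction l generalizing t with
  | nil => rfl
  | cons x xs ih =>
    by_cases h : x = 0
    · subst h
      simp [PySem.List.remove?_cons_self, pvA_prodSmall]
    · rw [PySem.List.remove?_cons_of_ne xs h]
      cases hr : PySem.List.remove? xs 0 with
      | none => simp
      | some ys =>
        simp only [Option.map_some, Option.getD_some, pvA_prodSmall]
        split_ifs with hx
        · have := ih (t * x); rw [hr] at this; simpa using this
        · have := ih t; rw [hr] at this; simpa using this

theorem pvA_scan_true (l : List Int) : pvA_scan l true = !l.contains 0 := by
  induction l with
  | nil => rfl
  | cons y ys ih =>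
    simp only [pvA_scan]
    split_ifs with h
    · simp [h]
    · rw [ih]; simp [Ne.symm h]

theorem pvA_scan_false (l : List Int) :
    pvA_scan l false = (!l.isEmpty && !l.contains 0) := by
  cases l with
  | nil => rfl
  | cons y ys =>
    simp only [pvA_scan]
    split_ifs with h
    · simp [h]
    · rw [pvA_scan_true]; simp [Ne.symm h]

theorem pv_loop_eq (l : List Int) (tc : Bool) (t : Int) :
    pvA_loop l tc t = pvB_loop l t (PySem.List.count l 0 : Int) tc := by
  induction l generalizing tc t with
  | nil => rfl
  | cons x rest ih =>
    simp only [pvA_loop, pvB_loop]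
    by_cases hx : x = 0
    · subst hx
      have hc : ((PySem.List.count ((0 : Int) :: rest) 0 : Int)) - 1
          = (PySem.List.count rest 0 : Int) := by
        simp [PySem.List.count_eq]
      rw [if_pos rfl, hc]
      cases tc with
      | true =>
        have h1 : ¬((0:Int) ≠ 0 ∧ (0:Int) > 0 ∧ (0:Int) < 9 ∧ (true : Bool) = true) := by simp
        have h2 : ¬((0:Int) ≠ 0 ∧ (0:Int) > 0 ∧ (0:Int) < 9 ∧ (true : Bool) = false) := by simp
        rw [if_neg h1, if_neg h2, if_pos ⟨rfl, rfl⟩, ih]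
        simp
      | false =>
        have h1 : ¬((0:Int) ≠ 0 ∧ (0:Int) > 0 ∧ (0:Int) < 9 ∧ (false : Bool) = true) := by simp
        have h2 : ¬((0:Int) ≠ 0 ∧ (0:Int) > 0 ∧ (0:Int) < 9 ∧ (false : Bool) = false) := by simp
        have h3 : ¬((0:Int) = 0 ∧ (false : Bool) = true) := by simp
        rw [if_neg h1, if_neg h2, if_neg h3, if_pos ⟨rfl, rfl⟩, ih]
        congr 1
        rw [pvA_scan_false]
        by_cases hm : (0 : Int) ∈ rest
        · have : List.count (0:Int) rest ≠ 0 := by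
            simpa [List.count_eq_zero] using hm
          simp [hm, PySem.List.count_eq, this]
        · have : List.count (0:Int) rest = 0 := by
            simpa [List.count_eq_zero] using hm
          simp [hm, PySem.List.count_eq, this, Bool.and_comm]
    · have hc2 : ((PySem.List.count (x :: rest) 0 : Nat) : Int)
          = ((PySem.List.count rest 0 : Nat) : Int) := by
        simp [PySem.List.count_eq, hx]
      rw [if_neg hx, hc2]
      cases tc with
      | true =>
        by_cases hs : x > 0 ∧ x < 9
        · rw [if_pos ⟨hx, hs.1, hs.2, rfl⟩, if_pos ⟨hs.1, hs.2, by simp⟩, ih]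
        · have h1 : ¬(x ≠ 0 ∧ x > 0 ∧ x < 9 ∧ (true : Bool) = true) := by tauto
          have h2 : ¬(x ≠ 0 ∧ x > 0 ∧ x < 9 ∧ (true : Bool) = false) := by simp
          have h3 : ¬(x = 0 ∧ (true : Bool) = true) := by tauto
          have h4 : ¬(x = 0 ∧ (true : Bool) = false) := by simp
          have h5 : ¬(0 < x ∧ x < 9 ∧ ((true : Bool) || decide (PySem.Int.mod x 2 ≠ 0)) = true) := by
            tauto
          rw [if_neg h1, if_neg h2, if_neg h3, if_neg h4, if_neg h5, ih]
      | false =>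
        have h1 : ¬(x ≠ 0 ∧ x > 0 ∧ x < 9 ∧ (false : Bool) = true) := by simp
        have h3 : ¬(x = 0 ∧ (false : Bool) = true) := by simp
        have h4 : ¬(x = 0 ∧ (false : Bool) = false) := by tauto
        rw [if_neg h1, if_neg h3, if_neg h4]
        by_cases hs : x > 0 ∧ x < 9
        · rw [if_pos ⟨hx, hs.1, hs.2, rfl⟩]
          by_cases hodd : PySem.Int.mod x 2 ≠ 0
          · have hodd' : x % 2 = 1 := by
              rw [PySem.Int.mod, Int.fmod_eq_emod] at hodd; simp at hodd; omega
            rw [if_pos hodd, if_pos ⟨hs.1, hs.2, by simp [hodd']⟩, ih]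
          · have heven : (2 : Int) ∣ x := by
              rw [PySem.Int.mod, Int.fmod_eq_emod] at hodd; simp at hodd; omega
            rw [if_neg hodd,
              if_neg (show ¬(0 < x ∧ x < 9 ∧ ((false : Bool) || decide (PySem.Int.mod x 2 ≠ 0)) = true) by
                simp; exact fun _ _ => heven), ih]
        · have h2 : ¬(x ≠ 0 ∧ x > 0 ∧ x < 9 ∧ (false : Bool) = false) := by tauto
          have h5 : ¬(0 < x ∧ x < 9 ∧ ((false : Bool) || decide (PySem.Int.mod x 2 ≠ 0)) = true) := by
            tauto
          rw [if_neg h2, if_neg h5, ih]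

-- ===== VERDICT (by name: the statement is the Claim_ definition above) =====
theorem ProductX_spec : Claim_equal_ProductX := by
  intro num_list _
  unfold Spec_ProductX ProductX ProductX_alt
  simp only [pvA_countZeros_eq, zero_add]
  split_ifs with h
  · rw [pvA_prodSmall_remove, pvA_prodSmall_eq]
  · exact pv_loop_eq _ _ _
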